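-- pv_equiv track=rewrite | github.com/evanraalte/piano_midi_tdd | tests/utils.py | black_keys_seen
-- ===== SOURCE A (Python) =====
-- from itertools import cycle
--
-- def black_keys_seen(key_num: int) -> int:
--     jumps = cycle([3, 2, 3, 2, 2])
--     if key_num == 0:
--         return 0
--     cnt = 1
--     next_jump = next(jumps)
--     last_seen = 1
--     for k in range(2, key_num + 1):
--         if k == last_seen + next_jump:
--             cnt += 1
--             next_jump = next(jumps)
--             last_seen = k
--     return cnt
-- ===== SOURCE B (Python) =====
-- # Closed form: each octave of 12 keys contains 5 black keys (at offsets 1,4,6,9,11),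
-- # so count = 5 * full_octaves + table[remainder].
-- _BLACKS_UPTO = [0, 1, 1, 1, 2, 2, 3, 3, 3, 4, 4, 5]
--
-- def black_keys_seen(key_num: int) -> int:
--     octaves, rem = divmod(key_num, 12)
--     return 5 * octaves + _BLACKS_UPTO[rem]
-- ===== Notes on version B (the rewrite author's own statement) =====
-- stated objective: faster
-- what changed: replaced the O(n) scan that simulates the cycle of jumps with an O(1) closed form: 5 black keys per full octave of 12 plus a 12-entry remainder lookup table
-- outside the precondition, e.g. on black_keys_seen(-1): A returns 1, B returns 0
import Mathlib
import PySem

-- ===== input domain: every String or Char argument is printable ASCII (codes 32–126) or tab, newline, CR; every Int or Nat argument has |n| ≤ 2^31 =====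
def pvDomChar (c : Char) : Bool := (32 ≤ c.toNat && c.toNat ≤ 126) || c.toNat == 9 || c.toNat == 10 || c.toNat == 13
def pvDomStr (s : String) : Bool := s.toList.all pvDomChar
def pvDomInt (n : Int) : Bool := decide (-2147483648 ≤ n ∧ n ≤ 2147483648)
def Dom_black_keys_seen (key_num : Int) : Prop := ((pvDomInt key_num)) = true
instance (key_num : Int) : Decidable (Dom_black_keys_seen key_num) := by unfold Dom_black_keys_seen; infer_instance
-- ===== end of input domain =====

-- B replaces A's O(n) scan with an O(1) closed form (5 black keys per octave + remainder table).

-- ===== PORT A =====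
-- itertools.cycle([3,2,3,2,2]) is modelled by the fixed list plus a running index taken mod 5;
-- next(jumps) reads jumpsList[j % 5] and advances j (exact: cycle repeats the list forever).
def jumpsList : List Int := [3, 2, 3, 2, 2]

def aStep (st : Int × Int × Nat × Int) (k : Int) : Int × Int × Nat × Int :=
  match st with
  | (cnt, next_jump, j, last_seen) =>
    if k = last_seen + next_jump then (cnt + 1, jumpsList.getD (j % 5) 0, j + 1, k)
    else (cnt, next_jump, j, last_seen)

def black_keys_seen (key_num : Int) : Int :=
  if key_num = 0 then 0
  else
    ((PySem.List.pyRange 2 (key_num + 1) 1).foldl aStep (1, jumpsList.getD 0 0, 1, 1)).1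

-- ===== PORT B =====
def blacksUpto : List Int := [0, 1, 1, 1, 2, 2, 3, 3, 3, 4, 4, 5]

def black_keys_seen_alt (key_num : Int) : Int :=
  let octaves := PySem.Int.floordiv key_num 12
  let rem := PySem.Int.mod key_num 12
  5 * octaves + PySem.List.pyGetD blacksUpto rem 0

-- ===== PRECONDITION & SPEC =====
-- Pre_ restricts to the natural domain of nonnegative key counts; on negative key_num the
-- loop of A never runs and A returns its leftover initial count 1, while B's floor
-- arithmetic returns a nonpositive value.
def Pre_black_keys_seen (key_num : Int) : Prop := 0 ≤ key_num
instance (key_num : Int) : Decidable (Pre_black_keys_seen key_num) := by unfold Pre_black_keys_seen; infer_instance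
def pvWitness_black_keys_seen : Int := 13

def Spec_black_keys_seen (key_num : Int) (out : Int) : Prop := out = black_keys_seen_alt key_num
instance (key_num : Int) (out : Int) : Decidable (Spec_black_keys_seen key_num out) := by unfold Spec_black_keys_seen; infer_instance

-- ===== CLAIM (what is proved, stated in full; the proofs are below) =====
def Claim_equal_black_keys_seen : Prop := ∀ (key_num : Int), Dom_black_keys_seen key_num → Pre_black_keys_seen key_num → Spec_black_keys_seen key_num (black_keys_seen key_num)

-- ===== LEMMAS AND PROOFS =====

-- Tables (indexed by n % 12) describing A's loop state after processing keys 2..n: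
-- count of black keys seen, pending next_jump, next cycle index, last black key seen.
def tNJ : List Int := [2, 3, 3, 3, 2, 2, 3, 3, 3, 2, 2, 2]
def tJ : List Nat := [0, 1, 1, 1, 2, 2, 3, 3, 3, 4, 4, 5]
def tLS : List Int := [-1, 1, 1, 1, 4, 4, 6, 6, 6, 9, 9, 11]

def stateOf (n : Nat) : Int × Int × Nat × Int :=
  (5 * ((n / 12 : Nat) : Int) + blacksUpto.getD (n % 12) 0,
   tNJ.getD (n % 12) 0,
   5 * (n / 12) + tJ.getD (n % 12) 0,
   12 * ((n / 12 : Nat) : Int) + tLS.getD (n % 12) 0)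

lemma step_state (m : Nat) : aStep (stateOf m) ((m : Int) + 1) = stateOf (m + 1) := by
  obtain ⟨q, r, hr, rfl⟩ : ∃ q r, r < 12 ∧ m = 12 * q + r :=
    ⟨m / 12, m % 12, Nat.mod_lt m (by norm_num), by omega⟩
  interval_cases r <;>
    · simp only [stateOf, aStep, Nat.add_assoc]
      norm_num [Nat.mul_add_div, Nat.mul_add_mod, Prod.mk.injEq, blacksUpto, tNJ, tLS, tJ,
        jumpsList]
      try split_ifs with hif
      all_goals try simp only [Prod.mk.injEq, true_and]
      all_goals push_cast
      all_goals omega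

lemma loop_state (n : Nat) (h : 1 ≤ n) :
    (PySem.List.pyRange 2 ((n : Int) + 1) 1).foldl aStep (1, jumpsList.getD 0 0, 1, 1)
      = stateOf n := by
  induction n with
  | zero => omega
  | succ m ih =>
    by_cases hm : 1 ≤ m
    · have hsplit : PySem.List.pyRange 2 (((m + 1 : Nat) : Int) + 1) 1
          = PySem.List.pyRange 2 ((m : Int) + 1) 1 ++ [(m : Int) + 1] := by
        push_cast
        exact PySem.List.pyRange_one_succ_right (by omega)
      rw [hsplit, List.foldl_append, ih hm]
      exact step_state m
    · have : m = 0 := by omega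
      subst this
      decide

-- ===== VERDICT (by name: the statement is the Claim_ definition above) =====
theorem black_keys_seen_spec : Claim_equal_black_keys_seen := by
  intro key_num _ hpre
  unfold Spec_black_keys_seen
  obtain ⟨n, rfl⟩ : ∃ n : Nat, key_num = (n : Int) :=
    ⟨key_num.toNat, (Int.toNat_of_nonneg hpre).symm⟩
  rcases Nat.eq_zero_or_pos n with hn | hn
  · subst hn; decide
  · have h12 : (0 : Int) < 12 := by norm_num
    unfold black_keys_seen black_keys_seen_alt
    rw [if_neg (by omega : ¬ ((n : Int) = 0))]
    rw [loop_state n hn]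
    simp only [stateOf]
    rw [PySem.Int.floordiv_eq_ediv_of_pos h12, PySem.Int.mod_eq_emod_of_pos h12]
    have hdiv : ((n : Int)) / 12 = ((n / 12 : Nat) : Int) := by omega
    have hmod : ((n : Int)) % 12 = ((n % 12 : Nat) : Int) := by omega
    rw [hdiv, hmod, PySem.List.pyGetD_natCast]
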